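-- pv_equiv track=rewrite | github.com/DawidBozek98/PodstawyProgramowania | Functions/7.15 .py | f
-- ===== SOURCE A (Python) =====
-- def f(detector):
--     count = 0  # licznik osób w pokoju
--
--     # Przechodzimy przez każdy znak w ciągu
--     for char in detector:
--         if char == "+":
--             count += 1  # Osoba wchodzi do pokoju
--         elif char == "-":
--             count -= 1  # Osoba wychodzi z pokoju
--
--         # Jeśli w pokoju jest 3 lub więcej osób, zwrócimy True
--         if count >= 3:
--             return True
--
--     # Jeśli mniej zwróci False
--     return False
-- ===== SOURCE B (Python) =====
-- def f(detector):
--     # Divide and conquer: each segment is summarised by (total delta, max prefix sum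
--     # including the empty prefix); segments combine associatively, and the room ever
--     # holds >= 3 people iff the whole string's max prefix sum is >= 3.
--     def dc(s):
--         if len(s) <= 1:
--             d = 1 if s == "+" else -1 if s == "-" else 0
--             return (d, max(0, d))
--         mid = len(s) // 2
--         tl, bl = dc(s[:mid])
--         tr, br = dc(s[mid:])
--         return (tl + tr, max(bl, tl + br))
--     return dc(detector)[1] >= 3
-- ===== Notes on version B (the rewrite author's own statement) =====
-- stated objective: alternative
-- what changed: B replaces A's single left-to-right scan with an early return by a divide-and-conquer: each half of the string is summarised by a (total delta, max prefix sum) pair, the pairs are combined associatively, and the answer is whether the whole string's max prefix sum is >= 3.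
import Mathlib
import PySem

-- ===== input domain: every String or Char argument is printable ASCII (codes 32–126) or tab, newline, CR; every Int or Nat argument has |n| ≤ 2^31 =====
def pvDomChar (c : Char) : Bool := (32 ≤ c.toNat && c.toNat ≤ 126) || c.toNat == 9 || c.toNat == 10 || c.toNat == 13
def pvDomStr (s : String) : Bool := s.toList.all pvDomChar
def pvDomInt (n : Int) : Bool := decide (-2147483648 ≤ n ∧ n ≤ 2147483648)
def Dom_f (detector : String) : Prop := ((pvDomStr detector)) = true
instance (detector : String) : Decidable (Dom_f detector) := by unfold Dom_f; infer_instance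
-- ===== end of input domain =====

-- B replaces A's linear scan (mutable counter, early return) with a divide-and-conquer
-- combining (total delta, max prefix sum) summaries of the two halves (objective: alternative).


-- ===== PORT A =====
-- loop over the characters with a mutable count and an early `return True`
def fLoop : List Char → Int → Bool
  | [], _ => false
  | ch :: rest, count =>
    let count := if ch = '+' then count + 1 else if ch = '-' then count - 1 else count
    if count ≥ 3 then true else fLoop rest count

def f (detector : String) : Bool := fLoop detector.toList 0

-- ===== PORT B =====
-- dc(s): (total delta of s, max prefix sum of s, the empty prefix included)
def fDC (l : List Char) : Int × Int :=
  if h : l.length ≤ 1 then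
    let d : Int := if l = ['+'] then 1 else if l = ['-'] then -1 else 0
    (d, max 0 d)
  else
    let mid := l.length / 2
    let pl := fDC (l.take mid)
    let pr := fDC (l.drop mid)
    (pl.1 + pr.1, max pl.2 (pl.1 + pr.2))
termination_by l.length
decreasing_by
  · simp only [List.length_take]; omega
  · simp only [List.length_drop]; omega

def f_alt (detector : String) : Bool := (fDC detector.toList).2 ≥ 3

-- ===== PRECONDITION & SPEC =====
def Spec_f (detector : String) (out : Bool) : Prop := out = f_alt detector
instance (detector : String) (out : Bool) : Decidable (Spec_f detector out) := by unfold Spec_f; infer_instance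

-- ===== CLAIM (what is proved, stated in full; the proofs are below) =====
def Claim_equal_f : Prop := ∀ (detector : String), Dom_f detector → Spec_f detector (f detector)

-- ===== LEMMAS AND PROOFS =====
-- per-character delta and the functional "max prefix sum" specification
def fDelta (ch : Char) : Int := if ch = '+' then 1 else if ch = '-' then -1 else 0

def sumD (l : List Char) : Int := (l.map fDelta).sum

def mp : List Char → Int
  | [] => 0
  | ch :: rest => max 0 (fDelta ch + mp rest)

theorem mp_nonneg (l : List Char) : 0 ≤ mp l := by
  cases l with
  | nil => simp [mp]
  | cons ch rest => simp [mp]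

theorem sumD_append (a b : List Char) : sumD (a ++ b) = sumD a + sumD b := by
  simp [sumD]

theorem mp_append (a b : List Char) : mp (a ++ b) = max (mp a) (sumD a + mp b) := by
  induction a with
  | nil =>
    have := mp_nonneg b
    simp only [List.nil_append, mp, sumD, List.map_nil, List.sum_nil]
    omega
  | cons ch rest ih =>
    simp only [List.cons_append, mp, ih, sumD]
    simp only [List.map_cons, List.sum_cons]
    omega

theorem fDC_spec (l : List Char) : fDC l = (sumD l, mp l) := by
  induction l using fDC.induct with
  | case1 l h =>
    rw [fDC]; simp only [dif_pos h]
    interval_cases hlen : l.length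
    · have : l = [] := List.eq_nil_of_length_eq_zero hlen
      subst this; simp [sumD, mp]
    · obtain ⟨c, hc⟩ : ∃ c, l = [c] := List.length_eq_one_iff.mp hlen
      subst hc
      by_cases h1 : c = '+' <;> by_cases h2 : c = '-' <;>
        simp [h1, h2, sumD, mp, fDelta]
  | case2 l h mid ih1 ih2 =>
    rw [fDC]; simp only [dif_neg h]
    simp only at ih1 ih2
    rw [ih1, ih2]
    have hsplit : l = l.take mid ++ l.drop mid := (List.take_append_drop _ _).symm
    conv_rhs => rw [hsplit]
    rw [sumD_append, mp_append]

theorem fLoop_eq_mp (l : List Char) (c : Int) (hc : c < 3) :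
    fLoop l c = decide (c + mp l ≥ 3) := by
  induction l generalizing c with
  | nil => simp [fLoop, mp]; omega
  | cons ch rest ih =>
    have hmp := mp_nonneg rest
    have hd : (if ch = '+' then c + 1 else if ch = '-' then c - 1 else c) = c + fDelta ch := by
      unfold fDelta; split_ifs <;> omega
    simp only [fLoop, hd, mp]
    by_cases h3 : (3:Int) ≤ c + fDelta ch
    · rw [if_pos (by omega : c + fDelta ch ≥ 3)]
      symm
      simp only [ge_iff_le, decide_eq_true_eq]
      omega
    · rw [if_neg (by omega), ih _ (by omega)]
      simp only [decide_eq_decide]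
      omega

-- ===== VERDICT (by name: the statement is the Claim_ definition above) =====
theorem f_spec : Claim_equal_f := by
  intro d _
  unfold Spec_f f f_alt
  rw [fDC_spec, fLoop_eq_mp _ _ (by omega)]
  simp only [decide_eq_decide, ge_iff_le]
  omega
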